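-- pv_equiv track=rewrite | github.com/Krishhiv17/Influencer_Detection | analyze_twitter_centrality.py | summarize_overlap
-- ===== SOURCE A (Python) =====
-- from collections import Counter
-- from typing import Dict, Iterable, Tuple
--
-- def summarize_overlap(rankings: Dict[str, Iterable[str]]) -> Dict[str, Counter]:
--     """Compute overlaps between ranked node lists."""
--     metrics = list(rankings)
--     summary: Dict[str, Counter] = {}
--
--     for metric in metrics:
--         shared = Counter()
--         metric_nodes = set(rankings[metric])
--         for other_metric in metrics:
--             if other_metric == metric:
--                 continue
--             shared[other_metric] = len(metric_nodes.intersection(rankings[other_metric]))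
--         summary[metric] = shared
--
--     return summary
-- ===== SOURCE B (Python) =====
-- from collections import Counter
--
--
-- def summarize_overlap(rankings):
--     """Compute overlaps between ranked node lists via an inverted node->metrics index."""
--     metrics = list(rankings)
--     node_to_metrics = {}
--     for metric in metrics:
--         for node in dict.fromkeys(rankings[metric]):
--             node_to_metrics.setdefault(node, []).append(metric)
--     summary = {m: Counter({o: 0 for o in metrics if o != m}) for m in metrics}
--     for present in node_to_metrics.values():
--         for a in present:
--             for b in present:
--                 if a != b:
--                     summary[a][b] += 1
--     return summary
-- ===== Notes on version B (the rewrite author's own statement) =====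
-- stated objective: alternative
-- what changed: B replaces A's all-pairs set-intersection loop by an inverted index: it builds a node-to-metrics map in one pass over the rankings, pre-initialises every pairwise counter to 0, and then counts each node's contribution to every ordered pair of metrics it appears under, traversing nodes instead of metric pairs.
import Mathlib
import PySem

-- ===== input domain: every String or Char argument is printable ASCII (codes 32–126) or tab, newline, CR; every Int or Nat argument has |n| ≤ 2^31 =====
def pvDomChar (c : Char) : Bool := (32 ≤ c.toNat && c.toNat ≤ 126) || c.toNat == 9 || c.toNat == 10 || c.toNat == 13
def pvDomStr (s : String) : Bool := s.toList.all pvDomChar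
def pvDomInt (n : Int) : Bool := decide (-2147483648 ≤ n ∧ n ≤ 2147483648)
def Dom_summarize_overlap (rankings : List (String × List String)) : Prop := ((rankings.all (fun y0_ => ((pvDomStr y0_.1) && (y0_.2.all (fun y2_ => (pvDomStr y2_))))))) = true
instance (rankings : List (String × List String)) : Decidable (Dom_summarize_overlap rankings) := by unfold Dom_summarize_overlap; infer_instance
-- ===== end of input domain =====

-- B replaces A's all-pairs set intersections by an inverted node→metrics index traversed once
-- (alternative decomposition, same exact result).

-- ===== PORT A =====
-- dict parameter is received as its item list; Python's dict(pairs) is PySem.Dict.ofList.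
-- rankings[metric] is ported as getD with default [] : every looked-up metric is a key, so the
-- default is never used (Python would raise KeyError only for a missing key).
def summarize_overlap (rankings : List (String × List String)) : List (String × List (String × Int)) :=
  let rd := PySem.Dict.ofList rankings
  let metrics := rd.keys
  let summary :=
    metrics.foldl (fun (summary : PySem.Dict String (PySem.Dict String Int)) metric =>
      let metric_nodes := PySem.Set.ofList (rd.getD metric [])
      let shared :=
        metrics.foldl (fun (shared : PySem.Dict String Int) other_metric =>
          if other_metric == metric then shared
          else shared.insert other_metric
            ((PySem.Set.inter metric_nodes (rd.getD other_metric [])).length : Int))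
          PySem.Dict.empty
      summary.insert metric shared)
      PySem.Dict.empty
  summary.items.map (fun p => (p.1, p.2.items))

-- ===== PORT B =====
-- node_to_metrics.setdefault(node, []).append(metric) is Dict.modify node [] (· ++ [metric]);
-- summary[a][b] += 1 is a nested Dict.modify (a is always a key of summary, so the ∅ default
-- is never used; Python would raise KeyError only for a missing key).
def summarize_overlap_alt (rankings : List (String × List String)) : List (String × List (String × Int)) :=
  let rd := PySem.Dict.ofList rankings
  let metrics := rd.keys
  let node_to_metrics :=
    metrics.foldl (fun (d : PySem.Dict String (List String)) metric =>
      (PySem.List.dedup (rd.getD metric [])).foldl (fun d node =>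
        d.modify node [] (fun l => l ++ [metric])) d)
      PySem.Dict.empty
  let summary0 :=
    metrics.foldl (fun (s : PySem.Dict String (PySem.Dict String Int)) m =>
      s.insert m ((metrics.filter (fun o => !(o == m))).foldl
        (fun (c : PySem.Dict String Int) o => c.insert o 0) PySem.Dict.empty))
      PySem.Dict.empty
  let summary :=
    node_to_metrics.values.foldl (fun s present =>
      present.foldl (fun s a =>
        present.foldl (fun s b =>
          if b == a then s
          else s.modify a PySem.Dict.empty (fun c => c.modify b 0 (· + 1))) s) s)
      summary0
  summary.items.map (fun p => (p.1, p.2.items))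

-- ===== PRECONDITION & SPEC =====
def Spec_summarize_overlap (rankings : List (String × List String)) (out : List (String × List (String × Int))) : Prop := out = summarize_overlap_alt rankings
instance (rankings : List (String × List String)) (out : List (String × List (String × Int))) : Decidable (Spec_summarize_overlap rankings out) := by unfold Spec_summarize_overlap; infer_instance

-- ===== CLAIM (what is proved, stated in full; the proofs are below) =====
def Claim_equal_summarize_overlap : Prop := ∀ (rankings : List (String × List String)), Dom_summarize_overlap rankings → Spec_summarize_overlap rankings (summarize_overlap rankings)

-- ===== LEMMAS AND PROOFS =====

-- Proof-side abbreviations about an arbitrary rankings dict rd.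
def pvR (rd : PySem.Dict String (List String)) (m : String) : List String := rd.getD m []
def pvInterLen (rd : PySem.Dict String (List String)) (m o : String) : Int :=
  ((PySem.Set.inter (PySem.Set.ofList (pvR rd m)) (pvR rd o)).length : Int)
def pvP (rd : PySem.Dict String (List String)) : List (String × String) :=
  rd.keys.flatMap (fun m => (PySem.List.dedup (pvR rd m)).map (fun n => (n, m)))
def pvNodes (rd : PySem.Dict String (List String)) : List String :=
  PySem.Set.ofList ((pvP rd).map (·.1))
def pvMn (rd : PySem.Dict String (List String)) (n : String) : List String :=
  rd.keys.filter (fun m => (PySem.List.dedup (pvR rd m)).contains n)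
def pvN (rd : PySem.Dict String (List String)) (m o : String) : Int :=
  (((pvNodes rd).map (pvMn rd)).countP (fun v => v.contains m && v.contains o) : Int)


-- ---- A normal form ----
lemma A_inner (rd : PySem.Dict String (List String)) (hnd : rd.keys.Nodup) (m : String) :
    (rd.keys.foldl (fun (sh : PySem.Dict String Int) o =>
        if o == m then sh
        else sh.insert o ((PySem.Set.inter (PySem.Set.ofList (rd.getD m [])) (rd.getD o [])).length : Int))
      PySem.Dict.empty).items
    = (rd.keys.filter (fun o => !(o == m))).map (fun o => (o, pvInterLen rd m o)) := by
  have hfun : (fun (sh : PySem.Dict String Int) o =>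
        if o == m then sh
        else sh.insert o ((PySem.Set.inter (PySem.Set.ofList (rd.getD m [])) (rd.getD o [])).length : Int))
      = fun sh o => if (!(o == m)) = true then sh.insert o ((PySem.Set.inter (PySem.Set.ofList (rd.getD m [])) (rd.getD o [])).length : Int) else sh := by
    funext sh o; cases h : o == m <;> simp [h]
  rw [hfun, ← List.foldl_filter]
  rw [PySem.Dict.items_foldl_insert_fresh _ (fun o => o)
        (fun o => ((PySem.Set.inter (PySem.Set.ofList (rd.getD m [])) (rd.getD o [])).length : Int)) _
        (fun a _ => PySem.Dict.contains_empty a) (by simpa using hnd.filter _)]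
  simp [pvInterLen, pvR]
  rfl

lemma A_normal (rankings : List (String × List String)) :
    summarize_overlap rankings =
      (PySem.Dict.ofList rankings).keys.map (fun m =>
        (m, ((PySem.Dict.ofList rankings).keys.filter (fun o => !(o == m))).map
              (fun o => (o, pvInterLen (PySem.Dict.ofList rankings) m o)))) := by
  unfold summarize_overlap
  simp only []
  have hnd : (PySem.Dict.ofList rankings).keys.Nodup := PySem.Dict.nodup_keys_ofList rankings
  rw [PySem.Dict.items_foldl_insert_fresh _ (fun m => m) _ _
        (fun a _ => PySem.Dict.contains_empty a) (by simp)]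
  have he : (PySem.Dict.empty : PySem.Dict String (PySem.Dict String Int)).items = [] := rfl
  rw [he, List.nil_append, List.map_map]
  refine List.map_congr_left (fun m hm => ?_)
  simp only [Function.comp]
  exact congrArg _ (A_inner _ hnd m)


-- ---- B-side machinery ----
lemma ntm_flatten (rd : PySem.Dict String (List String)) :
    rd.keys.foldl (fun (d : PySem.Dict String (List String)) metric =>
        (PySem.List.dedup (rd.getD metric [])).foldl (fun d node =>
          d.modify node [] (fun l => l ++ [metric])) d)
      PySem.Dict.empty
    = (pvP rd).foldl (fun d p => d.modify p.1 [] (fun l => l ++ [p.2])) PySem.Dict.empty := by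
  rw [pvP, List.foldl_flatMap]
  simp [List.foldl_map, pvR]

lemma block_lem (xs : List String) (hnd : xs.Nodup) (m n : String) :
    ((xs.map (fun n' => (n', m))).filter (fun p => p.1 == n)).map (·.2)
      = if n ∈ xs then [m] else [] := by
  induction xs with
  | nil => simp
  | cons x t ih =>
    obtain ⟨hx, ht⟩ := List.nodup_cons.mp hnd
    by_cases hxn : x = n
    · subst hxn
      simp [ih ht, hx]
    · simp [ih ht, hxn, Ne.symm hxn]

lemma getD_ntm (rd : PySem.Dict String (List String)) (n : String) :
    ((pvP rd).foldl (fun d p => d.modify p.1 [] (fun l => l ++ [p.2])) PySem.Dict.empty).getD n []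
      = pvMn rd n := by
  rw [PySem.Dict.getD_foldl_modify_append, PySem.Dict.getD_empty, List.nil_append, pvP,
      List.filter_flatMap, pvMn]
  induction rd.keys with
  | nil => simp
  | cons m t ih =>
    rw [List.flatMap_cons, List.map_append, ih, List.filter_cons]
    have hnodup : (PySem.List.dedup (pvR rd m)).Nodup := PySem.Set.nodup_ofList _
    rw [block_lem _ hnodup m n]
    by_cases h : n ∈ pvR rd m <;> simp [h]

-- ---- projection of the increment loops to one metric's counter ----
lemma proj_bloop (v' : List String) (s : PySem.Dict String (PySem.Dict String Int)) (a m : String) :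
    (v'.foldl (fun s b => if b == a then s
        else s.modify a PySem.Dict.empty (fun c => c.modify b 0 (· + 1))) s).getD m PySem.Dict.empty
    = if m = a then
        v'.foldl (fun c b => if b == a then c else c.modify b 0 (· + 1)) (s.getD a PySem.Dict.empty)
      else s.getD m PySem.Dict.empty := by
  induction v' generalizing s with
  | nil => by_cases h : m = a <;> simp [h]
  | cons b t ih =>
    cases hb : (b == a) with
    | true => simp only [List.foldl_cons, hb, if_pos, ih]
    | false =>
      simp only [List.foldl_cons, hb, Bool.false_eq_true, if_false, ih]
      rw [PySem.Dict.getD_modify, PySem.Dict.getD_modify]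
      by_cases h : m = a <;> simp [h]

lemma proj_aloop (l v : List String) (s : PySem.Dict String (PySem.Dict String Int)) (m : String) :
    (l.foldl (fun s a => v.foldl (fun s b => if b == a then s
        else s.modify a PySem.Dict.empty (fun c => c.modify b 0 (· + 1))) s) s).getD m PySem.Dict.empty
    = l.foldl (fun c a => if a = m then
          v.foldl (fun c b => if b == a then c else c.modify b 0 (· + 1)) c
        else c) (s.getD m PySem.Dict.empty) := by
  induction l generalizing s with
  | nil => simp
  | cons a t ih =>
    simp only [List.foldl_cons, ih, proj_bloop]
    by_cases h : a = m
    · subst h; simp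
    · have h' : ¬ (m = a) := fun hh => h hh.symm
      simp [h, h']

lemma proj_vs (vs : List (List String)) (s : PySem.Dict String (PySem.Dict String Int)) (m : String) :
    (vs.foldl (fun s present =>
        present.foldl (fun s a =>
          present.foldl (fun s b => if b == a then s
            else s.modify a PySem.Dict.empty (fun c => c.modify b 0 (· + 1))) s) s) s).getD m PySem.Dict.empty
    = vs.foldl (fun c v =>
        v.foldl (fun c a => if a = m then
            v.foldl (fun c b => if b == a then c else c.modify b 0 (· + 1)) c
          else c) c) (s.getD m PySem.Dict.empty) := by
  induction vs generalizing s with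
  | nil => simp
  | cons v t ih => simp only [List.foldl_cons, ih, proj_aloop]

-- ---- keys invariance ----
lemma keys_modify_mem {ν : Type} (c : PySem.Dict String ν) (b : String) (d0 : ν) (f : ν → ν)
    (hb : b ∈ c.keys) : (c.modify b d0 f).keys = c.keys := by
  rw [PySem.Dict.keys_modify]
  exact PySem.Dict.keys_insert_of_contains _ _ ((PySem.Dict.contains_iff_mem_keys _ _).mpr hb)

lemma keys_bloop (v' : List String) (c : PySem.Dict String Int) (m : String)
    (h : ∀ b ∈ v', b ≠ m → b ∈ c.keys) :
    (v'.foldl (fun c b => if b == m then c else c.modify b 0 (· + 1)) c).keys = c.keys := by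
  induction v' generalizing c with
  | nil => simp
  | cons b t ih =>
    cases hb : (b == m) with
    | true =>
      simp only [List.foldl_cons, hb, if_pos]
      exact ih c (fun x hx => h x (List.mem_cons_of_mem _ hx))
    | false =>
      have hbm : b ≠ m := by simpa using hb
      have hbk : b ∈ c.keys := h b (List.mem_cons_self) hbm
      simp only [List.foldl_cons, hb, Bool.false_eq_true, if_false]
      rw [ih _ (fun x hx hxm => by rw [keys_modify_mem c b 0 _ hbk]; exact h x (List.mem_cons_of_mem _ hx) hxm)]
      exact keys_modify_mem c b 0 _ hbk

lemma keys_ghost (l v : List String) (c : PySem.Dict String Int) (m : String)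
    (h : ∀ b ∈ v, b ≠ m → b ∈ c.keys) :
    (l.foldl (fun c a => if a = m then
        v.foldl (fun c b => if b == a then c else c.modify b 0 (· + 1)) c
      else c) c).keys = c.keys := by
  induction l generalizing c with
  | nil => simp
  | cons a t ih =>
    by_cases ha : a = m
    · subst ha
      simp only [List.foldl_cons, if_pos]
      rw [ih _ (fun x hx hxm => by rw [keys_bloop v c a h]; exact h x hx hxm)]
      exact keys_bloop v c a h
    · simp only [List.foldl_cons, ha, ite_false]
      exact ih c h

lemma keys_ghost_vs (vs : List (List String)) (c : PySem.Dict String Int) (m : String)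
    (h : ∀ v ∈ vs, ∀ b ∈ v, b ≠ m → b ∈ c.keys) :
    (vs.foldl (fun c v =>
        v.foldl (fun c a => if a = m then
            v.foldl (fun c b => if b == a then c else c.modify b 0 (· + 1)) c
          else c) c) c).keys = c.keys := by
  induction vs generalizing c with
  | nil => simp
  | cons v t ih =>
    simp only [List.foldl_cons]
    have h1 := keys_ghost v v c m (h v List.mem_cons_self)
    rw [ih _ (fun w hw x hx hxm => by rw [h1]; exact h w (List.mem_cons_of_mem _ hw) x hx hxm)]
    exact h1

-- ---- counting ----
lemma count_bloop (v' : List String) (c : PySem.Dict String Int) (m o : String) :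
    (v'.foldl (fun c b => if b == m then c else c.modify b 0 (· + 1)) c).getD o 0
    = c.getD o 0 + (v'.countP (fun b => b == o && !(b == m)) : Int) := by
  induction v' generalizing c with
  | nil => simp
  | cons b t ih =>
    cases hb : (b == m) with
    | true =>
      have : ((fun b => b == o && !(b == m)) b) = false := by
        simp only [hb]; simp [(by simpa using hb : b = m)]
      simp only [List.foldl_cons, hb, if_pos, List.countP_cons, this, ih]
      simp
    | false =>
      simp only [List.foldl_cons, hb, Bool.false_eq_true, if_false, ih, List.countP_cons]
      rw [PySem.Dict.getD_modify]
      by_cases hbo : o = b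
      · subst hbo
        simp only [beq_self_eq_true, Bool.not_false, Bool.and_true, if_pos]
        push_cast; ring
      · have : (b == o) = false := by simpa using fun h => hbo h.symm
        simp only [this, Bool.false_and, hbo, ite_false]
        simp

lemma count_ghost (l v : List String) (c : PySem.Dict String Int) (m o : String) :
    (l.foldl (fun c a => if a = m then
        v.foldl (fun c b => if b == a then c else c.modify b 0 (· + 1)) c
      else c) c).getD o 0
    = c.getD o 0 + (l.count m : Int) * (v.countP (fun b => b == o && !(b == m)) : Int) := by
  induction l generalizing c with
  | nil => simp
  | cons a t ih =>
    by_cases ha : a = m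
    · subst ha
      simp only [List.foldl_cons, if_pos, ih, count_bloop, List.count_cons_self]
      push_cast; ring
    · have : (a == m) = false := by simpa using ha
      simp only [List.foldl_cons, ha, ite_false, ih, List.count_cons, this]
      simp

lemma count_nodup (v : List String) (hv : v.Nodup) (m o : String) (hmo : m ≠ o) :
    (v.count m : Int) * (v.countP (fun b => b == o && !(b == m)) : Int)
    = if v.contains m && v.contains o then 1 else 0 := by
  have h1 : v.countP (fun b => b == o && !(b == m)) = v.count o := by
    rw [List.count]
    exact List.countP_congr (fun x _ => by
      constructor
      · intro h; exact (Bool.and_elim_left h)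
      · intro h
        have hx : x = o := by simpa using h
        subst hx
        simp [(by simpa using Ne.symm hmo : (x == m) = false)])
  rw [h1]
  by_cases hm : m ∈ v
  · by_cases ho : o ∈ v
    · rw [List.count_eq_one_of_mem hv hm, List.count_eq_one_of_mem hv ho]
      simp [hm, ho]
    · rw [List.count_eq_zero_of_not_mem ho]
      simp [ho]
  · rw [List.count_eq_zero_of_not_mem hm]
    simp [hm]

lemma count_ghost_vs (vs : List (List String)) (c : PySem.Dict String Int) (m o : String)
    (hmo : m ≠ o) (hnd : ∀ v ∈ vs, v.Nodup) :
    (vs.foldl (fun c v =>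
        v.foldl (fun c a => if a = m then
            v.foldl (fun c b => if b == a then c else c.modify b 0 (· + 1)) c
          else c) c) c).getD o 0
    = c.getD o 0 + (vs.countP (fun v => v.contains m && v.contains o) : Int) := by
  induction vs generalizing c with
  | nil => simp
  | cons v t ih =>
    simp only [List.foldl_cons, ih _ (fun w hw => hnd w (List.mem_cons_of_mem _ hw)),
      count_ghost, List.countP_cons]
    rw [count_nodup v (hnd v List.mem_cons_self) m o hmo]
    by_cases h : v.contains m && v.contains o <;> simp [h] <;> ring

-- ---- node_to_metrics values ----
lemma values_ntm (rd : PySem.Dict String (List String)) :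
    ((pvP rd).foldl (fun d p => d.modify p.1 [] (fun l => l ++ [p.2])) PySem.Dict.empty).values
      = (pvNodes rd).map (pvMn rd) := by
  have hk : ((pvP rd).foldl (fun d p => d.modify p.1 [] (fun l => l ++ [p.2]))
      (PySem.Dict.empty : PySem.Dict String (List String))).keys = pvNodes rd := by
    rw [PySem.Dict.keys_foldl_modify_key (pvP rd) (·.1) [] (fun d p => (fun l => l ++ [p.2])) _,
        PySem.Dict.keys_empty]
    rfl
  have hnd0 : ((pvP rd).foldl (fun d p => d.modify p.1 [] (fun l => l ++ [p.2]))
      (PySem.Dict.empty : PySem.Dict String (List String))).keys.Nodup := by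
    rw [hk]; exact PySem.Set.nodup_ofList _
  rw [PySem.Dict.values_eq_map_keys _ hnd0 [], hk]
  exact List.map_congr_left (fun n _ => getD_ntm rd n)

-- ---- outer keys invariance ----
lemma okeys_bloop (v' : List String) (s : PySem.Dict String (PySem.Dict String Int)) (a : String)
    (ha : a ∈ s.keys) :
    (v'.foldl (fun s b => if b == a then s
        else s.modify a PySem.Dict.empty (fun c => c.modify b 0 (· + 1))) s).keys = s.keys := by
  induction v' generalizing s with
  | nil => simp
  | cons b t ih =>
    cases hb : (b == a) with
    | true => simp only [List.foldl_cons, hb, if_pos]; exact ih s ha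
    | false =>
      simp only [List.foldl_cons, hb, Bool.false_eq_true, if_false]
      rw [ih _ (by rw [keys_modify_mem s a _ _ ha]; exact ha)]
      exact keys_modify_mem s a _ _ ha

lemma okeys_aloop (l v : List String) (s : PySem.Dict String (PySem.Dict String Int))
    (h : ∀ a ∈ l, a ∈ s.keys) :
    (l.foldl (fun s a => v.foldl (fun s b => if b == a then s
        else s.modify a PySem.Dict.empty (fun c => c.modify b 0 (· + 1))) s) s).keys = s.keys := by
  induction l generalizing s with
  | nil => simp
  | cons a t ih =>
    simp only [List.foldl_cons]
    have h1 := okeys_bloop v s a (h a List.mem_cons_self)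
    rw [ih _ (fun x hx => by rw [h1]; exact h x (List.mem_cons_of_mem _ hx))]
    exact h1

lemma okeys_vs (vs : List (List String)) (s : PySem.Dict String (PySem.Dict String Int))
    (h : ∀ v ∈ vs, ∀ a ∈ v, a ∈ s.keys) :
    (vs.foldl (fun s present =>
        present.foldl (fun s a =>
          present.foldl (fun s b => if b == a then s
            else s.modify a PySem.Dict.empty (fun c => c.modify b 0 (· + 1))) s) s) s).keys = s.keys := by
  induction vs generalizing s with
  | nil => simp
  | cons v t ih =>
    simp only [List.foldl_cons]
    have h1 := okeys_aloop v v s (h v List.mem_cons_self)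
    rw [ih _ (fun w hw x hx => by rw [h1]; exact h w (List.mem_cons_of_mem _ hw) x hx)]
    exact h1

-- ---- the zero-initialised counter ----
lemma items_C0 (rd : PySem.Dict String (List String)) (hnd : rd.keys.Nodup) (m : String) :
    ((rd.keys.filter (fun o => !(o == m))).foldl
        (fun (c : PySem.Dict String Int) o => c.insert o 0) PySem.Dict.empty).items
      = (rd.keys.filter (fun o => !(o == m))).map (fun o => (o, (0 : Int))) := by
  rw [PySem.Dict.items_foldl_insert_fresh _ (fun o => o) (fun _ => (0 : Int)) _
        (fun a _ => PySem.Dict.contains_empty a) (by simpa using hnd.filter _)]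
  rfl

lemma keys_C0 (rd : PySem.Dict String (List String)) (hnd : rd.keys.Nodup) (m : String) :
    ((rd.keys.filter (fun o => !(o == m))).foldl
        (fun (c : PySem.Dict String Int) o => c.insert o 0) PySem.Dict.empty).keys
      = rd.keys.filter (fun o => !(o == m)) := by
  have : ∀ (d : PySem.Dict String Int), d.keys = d.items.map (·.1) := fun d => rfl
  rw [this, items_C0 rd hnd m, List.map_map]
  exact List.map_id'' (congrFun rfl) _

lemma B_normal (rankings : List (String × List String)) :
    summarize_overlap_alt rankings =
      (PySem.Dict.ofList rankings).keys.map (fun m =>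
        (m, ((PySem.Dict.ofList rankings).keys.filter (fun o => !(o == m))).map
              (fun o => (o, pvN (PySem.Dict.ofList rankings) m o)))) := by
  unfold summarize_overlap_alt
  simp only []
  have hnd : (PySem.Dict.ofList rankings).keys.Nodup := PySem.Dict.nodup_keys_ofList rankings
  set rd := PySem.Dict.ofList rankings with hrd
  rw [ntm_flatten, values_ntm]
  -- normalise summary0
  have hitems0 : (rd.keys.foldl (fun (s : PySem.Dict String (PySem.Dict String Int)) m =>
      s.insert m ((rd.keys.filter (fun o => !(o == m))).foldl
        (fun (c : PySem.Dict String Int) o => c.insert o 0) PySem.Dict.empty))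
      PySem.Dict.empty).items
      = rd.keys.map (fun m => (m, (rd.keys.filter (fun o => !(o == m))).foldl
          (fun (c : PySem.Dict String Int) o => c.insert o 0) PySem.Dict.empty)) := by
    rw [PySem.Dict.items_foldl_insert_fresh _ (fun m => m) _ _
          (fun a _ => PySem.Dict.contains_empty a) (by simpa using hnd)]
    rfl
  have hkeys0 : (rd.keys.foldl (fun (s : PySem.Dict String (PySem.Dict String Int)) m =>
      s.insert m ((rd.keys.filter (fun o => !(o == m))).foldl
        (fun (c : PySem.Dict String Int) o => c.insert o 0) PySem.Dict.empty))
      PySem.Dict.empty).keys = rd.keys := by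
    have hk : ∀ (d : PySem.Dict String (PySem.Dict String Int)), d.keys = d.items.map (·.1) :=
      fun d => rfl
    rw [hk, hitems0, List.map_map]
    exact List.map_id'' (congrFun rfl) _
  -- membership of the per-node metric lists
  have hmemvs : ∀ v ∈ (pvNodes rd).map (pvMn rd), ∀ a ∈ v, a ∈ rd.keys := by
    intro v hv a ha
    obtain ⟨n, _, rfl⟩ := List.mem_map.mp hv
    exact List.mem_of_mem_filter ha
  have hndvs : ∀ v ∈ (pvNodes rd).map (pvMn rd), v.Nodup := by
    intro v hv
    obtain ⟨n, _, rfl⟩ := List.mem_map.mp hv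
    exact hnd.filter _
  -- keys of the final dict
  have hkeyf := okeys_vs ((pvNodes rd).map (pvMn rd)) _ (fun v hv a ha => by
    rw [hkeys0]; exact hmemvs v hv a ha)
  rw [hkeys0] at hkeyf
  have hndf : _ := hkeyf ▸ hnd
  rw [PySem.Dict.items_eq_map_keys _ hndf PySem.Dict.empty, hkeyf, List.map_map]
  refine List.map_congr_left (fun m hm => ?_)
  simp only [Function.comp]
  refine congrArg _ ?_
  -- project to metric m
  rw [proj_vs]
  have hC0 : (rd.keys.foldl (fun (s : PySem.Dict String (PySem.Dict String Int)) m =>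
      s.insert m ((rd.keys.filter (fun o => !(o == m))).foldl
        (fun (c : PySem.Dict String Int) o => c.insert o 0) PySem.Dict.empty))
      PySem.Dict.empty).getD m PySem.Dict.empty
      = (rd.keys.filter (fun o => !(o == m))).foldl
          (fun (c : PySem.Dict String Int) o => c.insert o 0) PySem.Dict.empty := by
    refine PySem.Dict.getD_of_mem_items _ ?_ (by rw [hkeys0]; exact hnd) _
    rw [hitems0]
    exact List.mem_map.mpr ⟨m, hm, rfl⟩
  rw [hC0]
  -- the final per-metric counter
  have hkdm := keys_ghost_vs ((pvNodes rd).map (pvMn rd)) _ m (fun v hv b hb hbm => by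
    rw [keys_C0 rd hnd m]
    exact List.mem_filter.mpr ⟨hmemvs v hv b hb, by simpa using hbm⟩)
  rw [keys_C0 rd hnd m] at hkdm
  have hnddm : _ := hkdm ▸ hnd.filter _
  rw [PySem.Dict.items_eq_map_keys _ hnddm 0, hkdm]
  refine List.map_congr_left (fun o ho => ?_)
  refine congrArg _ ?_
  have hom : m ≠ o := by
    have := (List.mem_filter.mp ho).2
    intro h; subst h; simp at this
  rw [count_ghost_vs _ _ m o hom hndvs]
  have hz : ((rd.keys.filter (fun o => !(o == m))).foldl
      (fun (c : PySem.Dict String Int) o => c.insert o 0) PySem.Dict.empty).getD o 0 = 0 := by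
    refine PySem.Dict.getD_of_mem_items _ ?_ (by rw [keys_C0 rd hnd m]; exact hnd.filter _) _
    rw [items_C0 rd hnd m]
    exact List.mem_map.mpr ⟨o, ho, rfl⟩
  rw [hz, pvN]
  ring

lemma pvInterLen' (rd : PySem.Dict String (List String)) (m o : String) :
  ((PySem.Set.inter (PySem.Set.ofList (pvR rd m)) (pvR rd o)).length : Int)
    = (((PySem.Set.ofList (pvR rd m)).filter (fun x => (pvR rd o).contains x)).length : Int) := rfl

lemma mem_pvNodes (rd : PySem.Dict String (List String)) (m x : String)
    (hm : m ∈ rd.keys) (hx : x ∈ pvR rd m) : x ∈ pvNodes rd := by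
  refine (PySem.Set.mem_ofList _ _).mpr ?_
  refine List.mem_map.mpr ⟨(x, m), ?_, rfl⟩
  refine List.mem_flatMap.mpr ⟨m, hm, ?_⟩
  exact List.mem_map.mpr ⟨x, (PySem.Set.mem_ofList _ _).mpr hx, rfl⟩

lemma N_eq_interLen (rd : PySem.Dict String (List String))
    (m o : String) (hm : m ∈ rd.keys) (ho : o ∈ rd.keys) :
    pvN rd m o = ((PySem.Set.inter (PySem.Set.ofList (pvR rd m)) (pvR rd o)).length : Int) := by
  rw [pvN, pvInterLen', List.countP_map]
  have hcongr : (pvNodes rd).countP ((fun v => v.contains m && v.contains o) ∘ pvMn rd)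
      = (pvNodes rd).countP (fun n => decide (n ∈ pvR rd m) && decide (n ∈ pvR rd o)) := by
    refine List.countP_congr (fun n _ => ?_)
    simp only [Function.comp, Bool.and_eq_true, List.contains_iff_mem, pvMn, List.mem_filter,
      decide_eq_true_eq]
    constructor
    · rintro ⟨⟨-, h1⟩, ⟨-, h2⟩⟩
      exact ⟨(PySem.Set.mem_ofList _ _).mp h1, (PySem.Set.mem_ofList _ _).mp h2⟩
    · rintro ⟨h1, h2⟩
      exact ⟨⟨hm, (PySem.Set.mem_ofList _ _).mpr h1⟩, ⟨ho, (PySem.Set.mem_ofList _ _).mpr h2⟩⟩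
  rw [hcongr, List.countP_eq_length_filter]
  congr 1
  refine List.Perm.length_eq ?_
  refine (List.perm_ext_iff_of_nodup ((PySem.Set.nodup_ofList _).filter _)
    ((PySem.Set.nodup_ofList _).filter _)).mpr (fun x => ?_)
  simp only [List.mem_filter, Bool.and_eq_true, decide_eq_true_eq, List.contains_iff_mem,
    PySem.Set.mem_ofList]
  constructor
  · rintro ⟨-, h1, h2⟩
    exact ⟨h1, h2⟩
  · rintro ⟨h1, h2⟩
    exact ⟨(PySem.Set.mem_ofList _ _).mp (mem_pvNodes rd m x hm h1), h1, h2⟩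

-- ===== VERDICT (by name: the statement is the Claim_ definition above) =====
theorem summarize_overlap_spec : Claim_equal_summarize_overlap := by
  intro rankings _
  unfold Spec_summarize_overlap
  rw [A_normal, B_normal]
  refine List.map_congr_left (fun m hm => ?_)
  refine congrArg _ (List.map_congr_left (fun o ho => ?_))
  refine congrArg _ ?_
  symm
  exact N_eq_interLen _ m o hm (List.mem_of_mem_filter ho)
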